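-- pv_equiv track=rewrite | github.com/cmu-11785-project/mlsp-csm-project | encoding/clean_dataset.py | capitalize_remove_punctuation
-- ===== SOURCE A (Python) =====
-- def capitalize_remove_punctuation(text):
--     """
--     Clean transcription by replacing punctuation tags and removing garbage tags.
--
--     Args:
--         text: Input transcription text
--
--     Returns:
--         Cleaned transcription text
--     """
--     # Replace punctuation tags
--     text = text.replace(' <COMMA>', ',')
--     text = text.replace(' <PERIOD>', '.')
--     text = text.replace(' <QUESTIONMARK>', '?')
--     text = text.replace(' <EXCLAMATIONPOINT>', '!')
--
--     # Remove garbage utterance tags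
--     garbage_tags = ['<SIL>', '<MUSIC>', '<NOISE>', '<OTHER>']
--     for tag in garbage_tags:
--         text = text.replace(tag, '')
--
--     # Capitalize first letter of each sentence
--     result = []
--     capitalize_next = True
--     for char in text:
--         if char.isalpha():
--             if capitalize_next:
--                 result.append(char.upper())
--                 capitalize_next = False
--             else:
--                 result.append(char.lower())
--         else:
--             result.append(char)
--             if char in '.!?':
--                 capitalize_next = True
--
--     text = ''.join(result)
--
--     # Replace standalone "i" and "i'" contractions with capital I
--     text = text.replace(' i ', ' I ')
--     text = text.replace(' i\'', ' I\'')
--     if text.startswith('i '):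
--         text = 'I' + text[1:]
--     if text.startswith('i\''):
--         text = 'I' + text[1:]
--
--     return text
-- ===== SOURCE B (Python) =====
-- def _fix(seg):
--     # uppercase the first alphabetic character of seg, lowercase the rest of seg after it
--     if not seg:
--         return seg
--     head, rest = seg[0], seg[1:]
--     if head.isalpha():
--         return head.upper() + rest.lower()
--     return head + _fix(rest)
--
--
-- def capitalize_remove_punctuation(text):
--     """
--     Clean transcription by replacing punctuation tags and removing garbage tags.
--     """
--     for old, new in ((' <COMMA>', ','), (' <PERIOD>', '.'),
--                      (' <QUESTIONMARK>', '?'), (' <EXCLAMATIONPOINT>', '!'),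
--                      ('<SIL>', ''), ('<MUSIC>', ''), ('<NOISE>', ''), ('<OTHER>', '')):
--         text = text.replace(old, new)
--
--     # Split into sentence segments, each ending right after a '.', '!' or '?',
--     # and fix the capitalization of each segment independently.
--     segments, cur = [], []
--     for ch in text:
--         cur.append(ch)
--         if ch in '.!?':
--             segments.append(''.join(cur))
--             cur = []
--     segments.append(''.join(cur))
--     text = ''.join(_fix(seg) for seg in segments)
--
--     # Replace standalone "i" and "i'" contractions with capital I
--     text = text.replace(' i ', ' I ').replace(" i'", " I'")
--     if text.startswith('i ') or text.startswith("i'"):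
--         text = 'I' + text[1:]
--     return text
-- ===== Notes on version B (the rewrite author's own statement) =====
-- stated objective: alternative
-- what changed: The stateful per-character capitalize_next walk is replaced by a split-and-fix pass: the text is split into sentence segments ending right after each terminator, and each segment independently gets its first alphabetic character uppercased and the letters after it lowercased.
import Mathlib
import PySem

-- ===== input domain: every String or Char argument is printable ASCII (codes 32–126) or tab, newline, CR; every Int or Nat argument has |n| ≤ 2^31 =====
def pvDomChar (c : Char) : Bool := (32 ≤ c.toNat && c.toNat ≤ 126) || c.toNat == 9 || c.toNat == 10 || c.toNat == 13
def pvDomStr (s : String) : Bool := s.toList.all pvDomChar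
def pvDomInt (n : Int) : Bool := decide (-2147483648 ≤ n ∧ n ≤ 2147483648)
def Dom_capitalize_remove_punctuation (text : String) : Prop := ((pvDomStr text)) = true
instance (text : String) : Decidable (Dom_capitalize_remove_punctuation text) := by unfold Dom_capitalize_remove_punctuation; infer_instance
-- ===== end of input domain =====

-- B replaces A's stateful per-character capitalize_next walk by a split-into-sentence-segments-and-fix-each pass (alternative decomposition, same asymptotic cost).


-- shared transliteration of Python's `char in '.!?'` (a one-char substring test = membership)
def pvIsTerm (c : Char) : Bool := ['.', '!', '?'].contains c

-- ===== PORT A =====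
def capitalize_remove_punctuation (text : String) : String :=
  let text := PySem.Str.replace text " <COMMA>" ","
  let text := PySem.Str.replace text " <PERIOD>" "."
  let text := PySem.Str.replace text " <QUESTIONMARK>" "?"
  let text := PySem.Str.replace text " <EXCLAMATIONPOINT>" "!"
  -- for tag in garbage_tags: text = text.replace(tag, '')
  let text := ["<SIL>", "<MUSIC>", "<NOISE>", "<OTHER>"].foldl
      (fun t tag => PySem.Str.replace t tag "") text
  -- result/capitalize_next loop over the characters
  let st := text.toList.foldl
      (fun (st : List Char × Bool) char =>
        if PySem.Chars.isalpha char then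
          if st.2 then (st.1 ++ [PySem.Chars.upperChar char], false)
          else (st.1 ++ [PySem.Chars.lowerChar char], false)
        else
          (st.1 ++ [char], if pvIsTerm char then true else st.2))
      ([], true)
  let text := String.ofList st.1
  let text := PySem.Str.replace text " i " " I "
  let text := PySem.Str.replace text " i'" " I'"
  let text := if PySem.Str.startswith text "i " then
      String.ofList ('I' :: PySem.Chars.slice text.toList (some 1) none) else text
  let text := if PySem.Str.startswith text "i'" then
      String.ofList ('I' :: PySem.Chars.slice text.toList (some 1) none) else text
  text

-- ===== PORT B =====
-- _fix: uppercase the first alphabetic char of a segment, lowercase the letters after it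
def pvFix : List Char → List Char
  | [] => []
  | c :: cs =>
      if PySem.Chars.isalpha c then PySem.Chars.upperChar c :: PySem.Chars.lower cs
      else c :: pvFix cs

def capitalize_remove_punctuation_alt (text : String) : String :=
  -- for old, new in (...): text = text.replace(old, new)
  let text := [(" <COMMA>", ","), (" <PERIOD>", "."), (" <QUESTIONMARK>", "?"),
               (" <EXCLAMATIONPOINT>", "!"), ("<SIL>", ""), ("<MUSIC>", ""),
               ("<NOISE>", ""), ("<OTHER>", "")].foldl
      (fun t p => PySem.Str.replace t p.1 p.2) text
  -- split into sentence segments ending right after '.', '!', '?'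
  let st := text.toList.foldl
      (fun (st : List (List Char) × List Char) ch =>
        let cur := st.2 ++ [ch]
        if pvIsTerm ch then (st.1 ++ [cur], []) else (st.1, cur))
      ([], [])
  let segs := st.1 ++ [st.2]
  let text := String.ofList ((segs.map pvFix).flatten)
  let text := PySem.Str.replace (PySem.Str.replace text " i " " I ") " i'" " I'"
  let text := if PySem.Str.startswith text "i " || PySem.Str.startswith text "i'" then
      String.ofList ('I' :: PySem.Chars.slice text.toList (some 1) none) else text
  text

-- ===== PRECONDITION & SPEC =====
def Spec_capitalize_remove_punctuation (text : String) (out : String) : Prop := out = capitalize_remove_punctuation_alt text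
instance (text : String) (out : String) : Decidable (Spec_capitalize_remove_punctuation text out) := by unfold Spec_capitalize_remove_punctuation; infer_instance

-- ===== CLAIM (what is proved, stated in full; the proofs are below) =====
def Claim_equal_capitalize_remove_punctuation : Prop := ∀ (text : String), Dom_capitalize_remove_punctuation text → Spec_capitalize_remove_punctuation text (capitalize_remove_punctuation text)

-- ===== LEMMAS AND PROOFS =====

-- A's character walk, as a recursion on the remaining characters with the capitalize_next flag
def pvWalk : Bool → List Char → List Char
  | _, [] => []
  | b, c :: cs =>
      if PySem.Chars.isalpha c then
        (if b then PySem.Chars.upperChar c else PySem.Chars.lowerChar c) :: pvWalk false cs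
      else c :: pvWalk (if pvIsTerm c then true else b) cs

theorem pv_lowerChar_nonalpha (c : Char) (h : PySem.Chars.isalpha c = false) :
    PySem.Chars.lowerChar c = c := by
  simp [PySem.Chars.isalpha, Bool.or_eq_false_iff] at h
  simp [PySem.Chars.lowerChar, h.1]

theorem pv_term_nonalpha (c : Char) (h : pvIsTerm c = true) :
    PySem.Chars.isalpha c = false := by
  simp [pvIsTerm] at h
  rcases h with h | h | h <;> subst h <;> decide

theorem pvFix_noalpha (l : List Char) (h : l.any PySem.Chars.isalpha = false) :
    pvFix l = l := by
  induction l with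
  | nil => rfl
  | cons c cs ih =>
      rw [List.any_cons, Bool.or_eq_false_iff] at h
      simp [pvFix, h.1, ih h.2]

theorem pvFix_append_noalpha (l x : List Char) (h : l.any PySem.Chars.isalpha = false) :
    pvFix (l ++ x) = l ++ pvFix x := by
  induction l with
  | nil => rfl
  | cons c cs ih =>
      rw [List.any_cons, Bool.or_eq_false_iff] at h
      simp [pvFix, h.1, ih h.2]

theorem pvFix_append_alpha (l x : List Char) (h : l.any PySem.Chars.isalpha = true) :
    pvFix (l ++ x) = pvFix l ++ PySem.Chars.lower x := by
  induction l with
  | nil => simp at h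
  | cons c cs ih =>
      by_cases hc : PySem.Chars.isalpha c = true
      · simp [pvFix, hc, PySem.Chars.lower]
      · have hc' : PySem.Chars.isalpha c = false := by simpa using hc
        rw [List.any_cons, hc', Bool.false_or] at h
        simp [pvFix, hc', ih h]

-- A's foldl accumulates exactly pvWalk
theorem pv_foldA (l : List Char) (res : List Char) (b : Bool) :
    (l.foldl
      (fun (st : List Char × Bool) char =>
        if PySem.Chars.isalpha char then
          if st.2 then (st.1 ++ [PySem.Chars.upperChar char], false)
          else (st.1 ++ [PySem.Chars.lowerChar char], false)
        else
          (st.1 ++ [char], if pvIsTerm char then true else st.2))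
      (res, b)).1 = res ++ pvWalk b l := by
  induction l generalizing res b with
  | nil => simp [pvWalk]
  | cons c cs ih =>
      by_cases hc : PySem.Chars.isalpha c = true
      · cases b
        · simp only [List.foldl_cons, if_pos hc, Bool.false_eq_true, if_false]
          rw [ih]
          simp [pvWalk, hc]
        · simp only [List.foldl_cons, if_pos hc]
          rw [ih]
          simp [pvWalk, hc]
      · simp only [List.foldl_cons, if_neg hc]
        rw [ih]
        simp [pvWalk, hc]

-- B's segmentation foldl, joined after pvFix, computes pvWalk
theorem pv_foldB (l : List Char) (segs : List (List Char)) (cur : List Char) :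
    (((l.foldl
      (fun (st : List (List Char) × List Char) ch =>
        let cur := st.2 ++ [ch]
        if pvIsTerm ch then (st.1 ++ [cur], []) else (st.1, cur))
      (segs, cur)).1 ++ [(l.foldl
      (fun (st : List (List Char) × List Char) ch =>
        let cur := st.2 ++ [ch]
        if pvIsTerm ch then (st.1 ++ [cur], []) else (st.1, cur))
      (segs, cur)).2]).map pvFix).flatten
    = (segs.map pvFix).flatten ++
      (if cur.any PySem.Chars.isalpha then pvFix cur ++ pvWalk false l
       else cur ++ pvWalk true l) := by
  induction l generalizing segs cur with
  | nil =>
      by_cases h : cur.any PySem.Chars.isalpha = true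
      · simp [h, pvWalk]
      · rw [Bool.not_eq_true] at h
        simp [h, pvWalk, pvFix_noalpha cur h]
  | cons c cs ih =>
      by_cases ht : pvIsTerm c = true
      · have hca := pv_term_nonalpha c ht
        simp only [List.foldl_cons, if_pos ht]
        rw [ih]
        by_cases h : cur.any PySem.Chars.isalpha = true
        · simp [h, pvFix_append_alpha cur [c] h, pvWalk, hca, ht,
            PySem.Chars.lower, pv_lowerChar_nonalpha c hca]
        · rw [Bool.not_eq_true] at h
          simp [h, pvFix_append_noalpha cur [c] h, pvFix, hca, pvWalk, ht]
      · simp only [List.foldl_cons, if_neg ht]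
        rw [ih]
        by_cases hc : PySem.Chars.isalpha c = true
        · by_cases h : cur.any PySem.Chars.isalpha = true
          · simp [h, hc, pvFix_append_alpha cur [c] h, pvWalk, PySem.Chars.lower]
          · rw [Bool.not_eq_true] at h
            simp [h, hc, pvFix_append_noalpha cur [c] h, pvFix, pvWalk,
              PySem.Chars.lower]
        · have hc' : PySem.Chars.isalpha c = false := by simpa using hc
          by_cases h : cur.any PySem.Chars.isalpha = true
          · simp [h, hc', pvFix_append_alpha cur [c] h, pvWalk, ht,
              PySem.Chars.lower, pv_lowerChar_nonalpha c hc']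
          · rw [Bool.not_eq_true] at h
            simp [h, hc', pvFix_append_noalpha cur [c] h, pvWalk, ht]

-- A's two sequential startswith fixups equal B's single or-guarded fixup
theorem pv_tail (t : String) :
    (let t1 := if PySem.Str.startswith t "i " then
        String.ofList ('I' :: PySem.Chars.slice t.toList (some 1) none) else t;
     if PySem.Str.startswith t1 "i'" then
        String.ofList ('I' :: PySem.Chars.slice t1.toList (some 1) none) else t1)
    = (if PySem.Str.startswith t "i " || PySem.Str.startswith t "i'" then
        String.ofList ('I' :: PySem.Chars.slice t.toList (some 1) none) else t) := by
  by_cases h1 : ['i', ' '] <+: t.toList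
  · have hni : ¬ (['i', '\''] <+: ('I' :: PySem.List.slice t.toList (some 1) none)) := by
      simp [List.cons_prefix_cons]
    simp [PySem.Chars.startswith_iff, h1, hni]
  · by_cases h2 : ['i', '\''] <+: t.toList
    · simp [PySem.Chars.startswith_iff, h1, h2]
    · simp [PySem.Chars.startswith_iff, h1, h2]

-- the two core loops from their actual initial states
theorem pv_foldA0 (l : List Char) :
    (l.foldl
      (fun (st : List Char × Bool) char =>
        if PySem.Chars.isalpha char then
          if st.2 then (st.1 ++ [PySem.Chars.upperChar char], false)
          else (st.1 ++ [PySem.Chars.lowerChar char], false)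
        else
          (st.1 ++ [char], if pvIsTerm char then true else st.2))
      ([], true)).1 = pvWalk true l := by
  rw [pv_foldA]; rfl

theorem pv_foldB0 (l : List Char) :
    (((l.foldl
      (fun (st : List (List Char) × List Char) ch =>
        let cur := st.2 ++ [ch]
        if pvIsTerm ch then (st.1 ++ [cur], []) else (st.1, cur))
      ([], [])).1 ++ [(l.foldl
      (fun (st : List (List Char) × List Char) ch =>
        let cur := st.2 ++ [ch]
        if pvIsTerm ch then (st.1 ++ [cur], []) else (st.1, cur))
      ([], [])).2]).map pvFix).flatten = pvWalk true l := by
  rw [pv_foldB]; simp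

-- ===== VERDICT (by name: the statement is the Claim_ definition above) =====
theorem capitalize_remove_punctuation_spec : Claim_equal_capitalize_remove_punctuation := by
  intro text _
  unfold Spec_capitalize_remove_punctuation
  unfold capitalize_remove_punctuation capitalize_remove_punctuation_alt
  simp only [List.foldl_cons, List.foldl_nil]
  rw [pv_foldA0, pv_foldB0]
  exact pv_tail _
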